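-- pv_equiv track=rewrite | github.com/benquick123/code-profiling | code/batch-2/vse-naloge-brez-testov/DN7-Z-204.py | brez_sosedov
-- ===== SOURCE A (Python) =====
-- def vsa_polja(s, v):
--     """
--     Generiraj vse koordinate (x, y) za polje s podano širino in višino
--     Args:
--         s (int): širina
--         v (int): višina
--
--     Returns:
--         generator parov polj
--     """
--     return ((x, y) for x in range(s) for y in range(v))
--
-- def sosedov(x, y, mine):
--     sosedi = [(x-1,y-1),(x+1,y+1),(x-1,y+1),(x+1,y-1),(x+1,y),(x- 1,y),(x,y+1),(x,y-1)]
--     stej_mine = 0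
--     for sosed in sosedi:
--         if sosed in mine:
--             stej_mine += 1
--     return stej_mine
--
-- def brez_sosedov(mine, s, v):
--     brez = set()
--     polja = vsa_polja(s, v)
--     for x,y in polja:
--         st_min = sosedov(x,y,mine)
--         if st_min == 0:
--             brez.add((x,y))
--     return brez
-- ===== SOURCE B (Python) =====
-- def brez_sosedov(mine, s, v):
--     brez = {(x, y) for x in range(s) for y in range(v)}
--     for mx, my in mine:
--         for dx in (-1, 0, 1):
--             for dy in (-1, 0, 1):
--                 if dx != 0 or dy != 0:
--                     brez.discard((mx + dx, my + dy))
--     return brez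
-- ===== Notes on version B (the rewrite author's own statement) =====
-- stated objective: alternative
-- what changed: Instead of counting, per grid cell, how many of its 8 neighbours occur in `mine`, B builds the full cell set and scatters: for each mine it discards that mine's 8 neighbour cells from the set, removing the per-cell membership scan of `mine`.
import Mathlib
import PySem

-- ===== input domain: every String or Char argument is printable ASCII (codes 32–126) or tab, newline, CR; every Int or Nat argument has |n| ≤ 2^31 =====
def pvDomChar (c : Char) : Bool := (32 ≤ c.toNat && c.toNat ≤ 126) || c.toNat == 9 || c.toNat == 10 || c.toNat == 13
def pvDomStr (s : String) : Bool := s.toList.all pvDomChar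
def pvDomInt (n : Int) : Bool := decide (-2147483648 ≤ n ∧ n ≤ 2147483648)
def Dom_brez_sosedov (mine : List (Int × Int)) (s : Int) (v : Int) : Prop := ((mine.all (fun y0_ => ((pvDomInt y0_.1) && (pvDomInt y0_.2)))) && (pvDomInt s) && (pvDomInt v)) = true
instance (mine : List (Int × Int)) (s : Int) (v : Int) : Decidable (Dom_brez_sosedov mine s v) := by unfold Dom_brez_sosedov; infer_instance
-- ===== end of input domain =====

-- B scatters instead of gathering: it starts from the full cell set and discards the 8
-- neighbours of every mine, instead of counting mine-neighbours per cell (alternative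
-- decomposition; one pass over the mines replaces the per-cell membership scan of `mine`).

-- ===== PORT A =====
-- helper `vsa_polja`: the generator ((x, y) for x in range(s) for y in range(v)) as a list
def vsa_polja (s v : Int) : List (Int × Int) :=
  (PySem.List.pyRange 0 s 1).flatMap (fun x => (PySem.List.pyRange 0 v 1).map (fun y => (x, y)))

-- helper `sosedov`: count how many of the 8 neighbours of (x,y) are in `mine`
def sosedov (x y : Int) (mine : List (Int × Int)) : Int :=
  ([(x-1,y-1),(x+1,y+1),(x-1,y+1),(x+1,y-1),(x+1,y),(x-1,y),(x,y+1),(x,y-1)] : List (Int × Int)).foldl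
    (fun stej_mine sosed => if sosed ∈ mine then stej_mine + 1 else stej_mine) 0

def brez_sosedov (mine : List (Int × Int)) (s : Int) (v : Int) : List (Int × Int) :=
  (vsa_polja s v).foldl
    (fun brez c => if sosedov c.1 c.2 mine = 0 then PySem.Set.add brez c else brez)
    PySem.Set.empty

-- ===== PORT B =====
def brez_sosedov_alt (mine : List (Int × Int)) (s : Int) (v : Int) : List (Int × Int) :=
  mine.foldl
    (fun brez m =>
      ([-1, 0, 1] : List Int).foldl
        (fun brez dx =>
          ([-1, 0, 1] : List Int).foldl
            (fun brez dy =>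
              if dx ≠ 0 ∨ dy ≠ 0 then PySem.Set.discard brez (m.1 + dx, m.2 + dy) else brez)
            brez)
        brez)
    (PySem.Set.ofList
      ((PySem.List.pyRange 0 s 1).flatMap (fun x => (PySem.List.pyRange 0 v 1).map (fun y => (x, y)))))

-- ===== PRECONDITION & SPEC =====
def Spec_brez_sosedov (mine : List (Int × Int)) (s : Int) (v : Int) (out : List (Int × Int)) : Prop := out = brez_sosedov_alt mine s v
instance (mine : List (Int × Int)) (s : Int) (v : Int) (out : List (Int × Int)) : Decidable (Spec_brez_sosedov mine s v out) := by unfold Spec_brez_sosedov; infer_instance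

-- ===== CLAIM (what is proved, stated in full; the proofs are below) =====
def Claim_equal_brez_sosedov : Prop := ∀ (mine : List (Int × Int)) (s : Int) (v : Int), Dom_brez_sosedov mine s v → Spec_brez_sosedov mine s v (brez_sosedov mine s v)

-- ===== LEMMAS AND PROOFS =====

-- the 8-neighbour list of a cell (proof-side name for the literal list in `sosedov`)
def pvSosedi (x y : Int) : List (Int × Int) :=
  [(x-1,y-1),(x+1,y+1),(x-1,y+1),(x+1,y-1),(x+1,y),(x-1,y),(x,y+1),(x,y-1)]

-- the grid list is duplicate-free
theorem pv_grid_nodup (s v : Int) :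
    ((PySem.List.pyRange 0 s 1).flatMap (fun x => (PySem.List.pyRange 0 v 1).map (fun y => (x, y)))).Nodup := by
  rw [List.nodup_flatMap]
  refine ⟨fun x _ => (PySem.List.nodup_pyRange_one 0 v).map (fun a b h => by simpa using h), ?_⟩
  refine (PySem.List.nodup_pyRange_one 0 s).imp ?_
  intro x x' hne p hp hp'
  simp at hp hp'
  obtain ⟨y, _, rfl⟩ := hp
  obtain ⟨y', _, h⟩ := hp'
  exact hne (congrArg Prod.fst h).symm

-- A's accumulation loop over a duplicate-free list, from a disjoint accumulator, is a filter
theorem pv_foldl_add_if (p : Int × Int → Prop) [DecidablePred p] (l acc : List (Int × Int))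
    (hnd : l.Nodup) (hdis : ∀ c ∈ l, c ∉ acc) :
    l.foldl (fun b c => if p c then PySem.Set.add b c else b) acc
      = acc ++ l.filter (fun c => decide (p c)) := by
  induction l generalizing acc with
  | nil => simp
  | cons c t ih =>
    simp only [List.foldl_cons, List.filter_cons]
    by_cases hp : p c
    · rw [if_pos hp, PySem.Set.add_of_not_mem (hdis c (by simp))]
      rw [ih (acc ++ [c]) hnd.of_cons ?_]
      · simp [hp]
      · intro c' hc' hmem
        rcases List.mem_append.mp hmem with h | h
        · exact hdis c' (by simp [hc']) h
        · simp at h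
          exact (List.nodup_cons.mp hnd).1 (h ▸ hc')
    · rw [if_neg hp, ih acc hnd.of_cons (fun c' hc' => hdis c' (by simp [hc']))]
      simp [hp]

-- a fold of filters is one filter with the conjoined predicate
theorem pv_foldl_filter {β : Type} (l : List β) (p : β → Int × Int → Bool) (b : List (Int × Int)) :
    l.foldl (fun b m => b.filter (p m)) b = b.filter (fun c => l.all (fun m => p m c)) := by
  induction l generalizing b with
  | nil => simp
  | cons m t ih =>
    simp only [List.foldl_cons, List.all_cons]
    rw [ih, List.filter_filter]
    exact List.filter_congr (fun c _ => by rw [Bool.and_comm])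

-- B's per-mine inner double loop discards exactly the cells whose neighbour set contains m
theorem pv_inner_eq (m : Int × Int) (b : List (Int × Int)) :
    (([-1, 0, 1] : List Int).foldl
      (fun brez dx =>
        ([-1, 0, 1] : List Int).foldl
          (fun brez dy =>
            if dx ≠ 0 ∨ dy ≠ 0 then PySem.Set.discard brez (m.1 + dx, m.2 + dy) else brez)
          brez)
      b)
    = b.filter (fun c => decide (m ∉ pvSosedi c.1 c.2)) := by
  simp only [List.foldl_cons, List.foldl_nil]
  norm_num [PySem.Set.discard, List.filter_filter]
  refine List.filter_congr (fun c _ => ?_)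
  rw [Bool.eq_iff_iff]
  simp [pvSosedi, Prod.ext_iff]
  omega

-- A's per-cell test: the neighbour count is zero iff no mine is a neighbour of the cell
theorem pv_sosedov_eq_zero (x y : Int) (mine : List (Int × Int)) :
    sosedov x y mine = 0 ↔ ∀ m ∈ mine, m ∉ pvSosedi x y := by
  unfold sosedov
  have h := PySem.List.foldl_count_if (fun sosed => decide (sosed ∈ mine))
    ([(x-1,y-1),(x+1,y+1),(x-1,y+1),(x+1,y-1),(x+1,y),(x-1,y),(x,y+1),(x,y-1)] : List (Int × Int)) 0
  simp only [decide_eq_true_eq] at h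
  rw [h]
  have hz : ((0 : Int) + (List.countP (fun sosed => sosed ∈ mine)
      ([(x-1,y-1),(x+1,y+1),(x-1,y+1),(x+1,y-1),(x+1,y),(x-1,y),(x,y+1),(x,y-1)] : List (Int × Int)) : Int) = 0)
      ↔ List.countP (fun sosed => decide (sosed ∈ mine))
      ([(x-1,y-1),(x+1,y+1),(x-1,y+1),(x+1,y-1),(x+1,y),(x-1,y),(x,y+1),(x,y-1)] : List (Int × Int)) = 0 := by
    omega
  rw [hz, List.countP_eq_zero]
  constructor
  · intro h m hm hmem
    exact h m (by simpa [pvSosedi] using hmem) (by simp [hm])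
  · intro h sd hsd
    simp only [decide_eq_true_eq]
    intro hmem
    exact h sd hmem (by simpa [pvSosedi] using hsd)

-- ===== VERDICT (by name: the statement is the Claim_ definition above) =====
theorem brez_sosedov_spec : Claim_equal_brez_sosedov := by
  intro mine s v _
  unfold Spec_brez_sosedov brez_sosedov brez_sosedov_alt vsa_polja
  have hnd := pv_grid_nodup s v
  rw [PySem.Set.ofList_eq_self_of_nodup _ hnd]
  rw [show (PySem.Set.empty : PySem.Set (Int × Int)) = [] from rfl,
     pv_foldl_add_if (fun c => sosedov c.1 c.2 mine = 0) _ [] hnd (by simp), List.nil_append]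
  have hfun : (fun (brez : List (Int × Int)) (m : Int × Int) =>
      ([-1, 0, 1] : List Int).foldl
        (fun brez dx =>
          ([-1, 0, 1] : List Int).foldl
            (fun brez dy =>
              if dx ≠ 0 ∨ dy ≠ 0 then PySem.Set.discard brez (m.1 + dx, m.2 + dy) else brez)
            brez)
        brez)
      = (fun b m => b.filter (fun c => decide (m ∉ pvSosedi c.1 c.2))) :=
    funext fun b => funext fun m => pv_inner_eq m b
  rw [hfun, pv_foldl_filter]
  refine List.filter_congr (fun c _ => ?_)
  rw [Bool.eq_iff_iff]
  simp only [decide_eq_true_eq, List.all_eq_true]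
  rw [pv_sosedov_eq_zero]
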